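-- pv_equiv track=rewrite | github.com/mohos26/Challenges | Python/Expert/Moving Particles Absorb Each Other after Collisions.py | moving_particles
-- ===== SOURCE A (Python) =====
-- def moving_particles(lst):
-- 	res = []
-- 	for i in lst:
-- 		if res and res[-1] > 0 and i < 0:
-- 			aid = res[-1] + abs(i)
-- 			if res[-1] < abs(i):
-- 				aid *= -1
-- 			res[-1] = aid
-- 		else:
-- 			res.append(i)
-- 	if res == lst:
-- 		return res
-- 	return moving_particles(res)
-- ===== SOURCE B (Python) =====
-- def moving_particles(lst):
--     res = []
--     for x in lst:
--         while res and res[-1] > 0 and x < 0: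
--             r = res.pop()
--             if r >= -x:
--                 x = r - x
--             else:
--                 x = x - r
--         res.append(x)
--     return res
-- ===== Notes on version B (the rewrite author's own statement) =====
-- stated objective: alternative
-- what changed: Replaces A's repeated whole-list passes with recursion-until-fixpoint by a single left-to-right stack pass that resolves each incoming negative particle against the stack top in a while loop, so each particle is pushed and popped at most once (worst-case linear vs A's worst-case quadratic, though on typical inputs the measured times are similar).
import Mathlib
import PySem

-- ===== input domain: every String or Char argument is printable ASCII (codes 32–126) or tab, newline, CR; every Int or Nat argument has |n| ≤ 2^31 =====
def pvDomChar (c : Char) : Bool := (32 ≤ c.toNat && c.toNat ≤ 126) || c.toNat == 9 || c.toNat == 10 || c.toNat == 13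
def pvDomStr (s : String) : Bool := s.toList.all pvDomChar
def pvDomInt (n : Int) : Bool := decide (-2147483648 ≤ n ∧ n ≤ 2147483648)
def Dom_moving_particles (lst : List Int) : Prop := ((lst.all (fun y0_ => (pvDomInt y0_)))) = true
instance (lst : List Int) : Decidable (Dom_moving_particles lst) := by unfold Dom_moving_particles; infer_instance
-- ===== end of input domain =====

-- B replaces A's recursion-until-fixpoint over whole-list passes by a single stack pass
-- (each particle pushed/popped at most once); return values proved equal on all inputs.

-- ===== PORT A =====
-- A's inner for-loop: res is kept head-is-last (Python list end = Lean list head), reversed on exit.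
def pvPassA (acc : List Int) (l : List Int) : List Int :=
  match l with
  | [] => acc.reverse
  | i :: rest =>
    match acc with
    | r :: racc =>
      if r > 0 ∧ i < 0 then
        pvPassA ((if r < |i| then -(r + |i|) else r + |i|) :: racc) rest
      else
        pvPassA (i :: r :: racc) rest
    | [] => pvPassA [i] rest

theorem pvPassA_len_le (l acc : List Int) :
    (pvPassA acc l).length ≤ acc.length + l.length := by
  induction l generalizing acc with
  | nil => simp [pvPassA]
  | cons i rest ih =>
    cases acc with
    | nil =>
      have := ih [i]
      simp [pvPassA] at this ⊢
      omega
    | cons r racc =>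
      by_cases h : r > 0 ∧ i < 0
      · simp only [pvPassA, if_pos h]
        have := ih ((if r < |i| then -(r + |i|) else r + |i|) :: racc)
        simp at this ⊢; omega
      · simp only [pvPassA, if_neg h]
        have := ih (i :: r :: racc)
        simp at this ⊢; omega

theorem pvPassA_eq_of_len (l acc : List Int)
    (h : (pvPassA acc l).length = acc.length + l.length) :
    pvPassA acc l = acc.reverse ++ l := by
  induction l generalizing acc with
  | nil => simp [pvPassA]
  | cons i rest ih =>
    cases acc with
    | nil =>
      have h' : (pvPassA [i] rest).length = [i].length + rest.length := by
        simp [pvPassA] at h ⊢; omega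
      have := ih [i] h'
      simpa [pvPassA] using this
    | cons r racc =>
      by_cases hc : r > 0 ∧ i < 0
      · exfalso
        have hle := pvPassA_len_le rest ((if r < |i| then -(r + |i|) else r + |i|) :: racc)
        simp only [pvPassA, if_pos hc] at h
        simp at hle h; omega
      · have hh : (pvPassA (i :: r :: racc) rest).length = (i :: r :: racc).length + rest.length := by
          simp only [pvPassA, if_neg hc] at h; simp at h ⊢; omega
        have := ih (i :: r :: racc) hh
        simp only [pvPassA, if_neg hc, this]
        simp

def moving_particles (lst : List Int) : List Int :=
  let res := pvPassA [] lst
  if res = lst then res else moving_particles res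
termination_by lst.length
decreasing_by
  rename_i hne
  have hle := pvPassA_len_le lst []
  simp at hle
  rcases lt_or_eq_of_le hle with h | h
  · exact h
  · exact absurd (by simpa using pvPassA_eq_of_len lst [] (by simpa using h)) hne

-- ===== PORT B =====
-- B's while loop: pop-and-merge the incoming x against the stack until it stops colliding.
def pvCollide (res : List Int) (x : Int) : List Int :=
  match res with
  | [] => [x]
  | r :: rest =>
    if r > 0 ∧ x < 0 then
      if r ≥ -x then (r - x) :: rest
      else pvCollide rest (x - r)
    else x :: r :: rest

def moving_particles_alt (lst : List Int) : List Int :=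
  (lst.foldl pvCollide []).reverse

-- ===== PRECONDITION & SPEC =====
def Spec_moving_particles (lst : List Int) (out : List Int) : Prop := out = moving_particles_alt lst
instance (lst : List Int) (out : List Int) : Decidable (Spec_moving_particles lst out) := by unfold Spec_moving_particles; infer_instance

-- ===== CLAIM (what is proved, stated in full; the proofs are below) =====
def Claim_equal_moving_particles : Prop := ∀ (lst : List Int), Dom_moving_particles lst → Spec_moving_particles lst (moving_particles lst)

-- ===== LEMMAS AND PROOFS =====

-- a positive particle is always simply pushed
theorem pvCollide_pos (s : List Int) (r : Int) (hr : 0 < r) : pvCollide s r = r :: s := by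
  cases s with
  | nil => rfl
  | cons t rest => simp [pvCollide]; omega

-- key merge lemma: one A-style merge of i into top r equals two B steps, on any stack
theorem pvCollide_merge (s : List Int) (r i : Int) (hr : 0 < r) (hi : i < 0) :
    pvCollide (pvCollide s r) i
      = pvCollide s (if r < |i| then -(r + |i|) else r + |i|) := by
  rw [pvCollide_pos s r hr]
  by_cases h : r ≥ -i
  · have habs : ¬ r < |i| := by rw [abs_of_neg hi]; omega
    rw [if_neg habs]
    have : pvCollide (r :: s) i = (r - i) :: s := by
      simp [pvCollide, hr, hi, h]
    rw [this, pvCollide_pos s (r + |i|) (by rw [abs_of_neg hi]; omega)]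
    rw [abs_of_neg hi]; ring_nf
  · have habs : r < |i| := by rw [abs_of_neg hi]; omega
    rw [if_pos habs]
    have : pvCollide (r :: s) i = pvCollide s (i - r) := by
      simp [pvCollide, hr, hi, h]
    rw [this]
    congr 1
    rw [abs_of_neg hi]; ring

-- folding over a snoc
theorem pvFold_snoc (a : List Int) (x : Int) :
    List.foldl pvCollide [] (x :: a).reverse
      = pvCollide (List.foldl pvCollide [] a.reverse) x := by
  simp [List.foldl_append]

-- invariance: the B-stack of one A-pass equals the B-stack of the input
theorem pvPassA_fold (l : List Int) : ∀ acc : List Int,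
    List.foldl pvCollide [] (pvPassA acc l)
      = List.foldl pvCollide (List.foldl pvCollide [] acc.reverse) l := by
  induction l with
  | nil => intro acc; simp [pvPassA]
  | cons i rest ih =>
    intro acc
    cases acc with
    | nil =>
      show List.foldl pvCollide [] (pvPassA [i] rest) = _
      rw [ih [i]]
      simp [pvCollide]
    | cons r racc =>
      by_cases h : r > 0 ∧ i < 0
      · simp only [pvPassA, if_pos h]
        rw [ih]
        rw [pvFold_snoc racc (if r < |i| then -(r + |i|) else r + |i|)]
        simp only [List.foldl_cons]
        rw [pvFold_snoc racc r]
        rw [pvCollide_merge _ r i h.1 h.2]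
      · simp only [pvPassA, if_neg h]
        rw [ih (i :: r :: racc), pvFold_snoc (r :: racc) i]
        simp only [List.foldl_cons]

-- fixpoint case: if the A-pass changes nothing, folding pvCollide only pushes
theorem pvFix_fold (l : List Int) : ∀ acc : List Int,
    pvPassA acc l = acc.reverse ++ l →
    List.foldl pvCollide acc l = l.reverse ++ acc := by
  induction l with
  | nil => intro acc _; simp
  | cons i rest ih =>
    intro acc h
    cases acc with
    | nil =>
      have h' : pvPassA [i] rest = [i].reverse ++ rest := by
        simpa [pvPassA] using h
      have := ih [i] h'
      simpa [pvCollide] using this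
    | cons r racc =>
      by_cases hc : r > 0 ∧ i < 0
      · exfalso
        have hle := pvPassA_len_le rest ((if r < |i| then -(r + |i|) else r + |i|) :: racc)
        simp only [pvPassA, if_pos hc] at h
        have : (pvPassA ((if r < |i| then -(r + |i|) else r + |i|) :: racc) rest).length
            = ((r :: racc).reverse ++ i :: rest).length := by rw [h]
        simp at hle this; omega
      · have h' : pvPassA (i :: r :: racc) rest = (i :: r :: racc).reverse ++ rest := by
          simp only [pvPassA, if_neg hc] at h
          simpa using h
        have := ih (i :: r :: racc) h'
        have hb : pvCollide (r :: racc) i = i :: r :: racc := by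
          simp only [pvCollide, if_neg hc]
        simp only [List.foldl_cons, hb, this]
        simp

theorem pvMainAux : ∀ (n : Nat) (lst : List Int), lst.length ≤ n →
    moving_particles lst = moving_particles_alt lst := by
  intro n
  induction n with
  | zero =>
    intro lst h
    have : lst = [] := by simpa using h
    subst this
    rw [moving_particles]
    simp [pvPassA, moving_particles_alt]
  | succ n ih =>
    intro lst hlen
    rw [moving_particles]
    by_cases hfix : pvPassA [] lst = lst
    · simp only [hfix]
      have hf := pvFix_fold lst [] (by simpa using hfix)
      unfold moving_particles_alt
      rw [hf]
      simp
    · simp only [hfix, ite_false]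
      have hle : (pvPassA [] lst).length ≤ lst.length := by
        simpa using pvPassA_len_le lst []
      have hlt : (pvPassA [] lst).length < lst.length := by
        rcases lt_or_eq_of_le hle with h | h
        · exact h
        · exact absurd (by simpa using pvPassA_eq_of_len lst [] (by simpa using h)) hfix
      rw [ih _ (by omega)]
      unfold moving_particles_alt
      rw [pvPassA_fold lst []]
      simp

theorem pvMain (lst : List Int) : moving_particles lst = moving_particles_alt lst :=
  pvMainAux lst.length lst le_rfl

-- ===== VERDICT (by name: the statement is the Claim_ definition above) =====
theorem moving_particles_spec : Claim_equal_moving_particles := by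
  intro lst _
  exact pvMain lst
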